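-- pv_equiv track=rewrite | github.com/CuriousCI/university | python/homework/2-required/program.py | speed_decode_value
-- ===== SOURCE A (Python) =====
-- def speed_decode_value(xkcd: str) -> int:
--     weigth, previous, total = "", 0, 0
--
--     for digit in xkcd[::-1]:
--         weigth = digit + weigth
--
--         if digit != "0":
--             weigth = int(weigth)
--             if previous > weigth:
--                 total -= weigth
--             else:
--                 total += weigth
--             previous = weigth
--             weigth = ""
--
--     return total
-- ===== SOURCE B (Python) =====
-- def speed_decode_value(xkcd: str) -> int:
--     # pass 1: forward scan collecting token values (a non-zero character plus its run
--     # of following zeros); leading zeros before the first non-zero char belong to no token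
--     vals, token = [], None
--     for ch in xkcd:
--         if ch == "0":
--             if token is not None:
--                 token += ch
--         else:
--             if token is not None:
--                 vals.append(int(token))
--             token = ch
--     if token is not None:
--         vals.append(int(token))
--     # pass 2: each value is subtracted when its successor is larger, else added
--     total = 0
--     for v, nxt in zip(vals, vals[1:] + [0]):
--         total += -v if nxt > v else v
--     return total
-- ===== Notes on version B (the rewrite author's own statement) =====
-- stated objective: alternative
-- what changed: A decodes in one backward pass over the reversed string, accumulating zero-runs into a string and closing tokens on the fly; B makes two forward passes: first it materializes the list of token values (non-zero digit plus its following zeros), then it sums each value with a sign decided by its successor.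
import Mathlib
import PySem

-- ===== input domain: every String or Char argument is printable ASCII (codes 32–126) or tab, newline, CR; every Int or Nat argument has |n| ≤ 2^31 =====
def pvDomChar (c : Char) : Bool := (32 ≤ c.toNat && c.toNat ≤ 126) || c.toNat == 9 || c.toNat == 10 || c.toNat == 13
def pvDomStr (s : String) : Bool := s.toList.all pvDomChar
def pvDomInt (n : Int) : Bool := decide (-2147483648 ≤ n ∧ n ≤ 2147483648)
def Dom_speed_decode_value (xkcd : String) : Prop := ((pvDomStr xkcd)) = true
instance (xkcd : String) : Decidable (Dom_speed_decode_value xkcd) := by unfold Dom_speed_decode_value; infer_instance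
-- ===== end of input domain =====

-- B replaces A's single reversed scan by two forward passes (token list, then signed sum): an alternative decomposition, not faster.

-- ===== PORT A =====
-- xkcd[::-1] is reversal (PySem.Chars.slice?_none_none_neg_one); weigth kept as List Char,
-- int(weigth) is PySem.Int.ofChars?, '.getD 0' only totalises the ValueError case excluded by Pre_.
def speed_decode_value (xkcd : String) : Int :=
  (xkcd.toList.reverse.foldl
    (fun (st : List Char × Int × Int) digit =>
      let w := digit :: st.1
      if digit ≠ '0' then
        let wv := (PySem.Int.ofChars? w).getD 0
        ([], wv, if st.2.1 > wv then st.2.2 - wv else st.2.2 + wv)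
      else (w, st.2.1, st.2.2))
    ([], 0, 0)).2.2

-- ===== PORT B =====
-- pass 1: forward fold building (open token?, closed token values); pass 2: fold over zip(vals, vals[1:]+[0]).
def speed_decode_value_alt (xkcd : String) : Int :=
  let st := xkcd.toList.foldl
    (fun (st : Option (List Char) × List Int) ch =>
      if ch = '0' then
        match st.1 with
        | none => st
        | some t => (some (t ++ ['0']), st.2)
      else
        match st.1 with
        | none => (some [ch], st.2)
        | some t => (some [ch], st.2 ++ [(PySem.Int.ofChars? t).getD 0]))
    (none, [])
  let vals := match st.1 with
    | none => st.2
    | some t => st.2 ++ [(PySem.Int.ofChars? t).getD 0]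
  (vals.zip (vals.drop 1 ++ [0])).foldl
    (fun total p => total + (if p.2 > p.1 then -p.1 else p.1)) 0

-- ===== PRECONDITION & SPEC =====
-- Pre_ holds exactly on the strings where A returns: every character is a digit, or a
-- sign/whitespace character immediately followed by a zero digit (so that the int(token)
-- A forms parses); outside Pre_ some int(token) raises ValueError in A (and likewise in B).
def Pre_speed_decode_value (xkcd : String) : Prop :=
  ((List.range xkcd.toList.length).all (fun i =>
    let c := xkcd.toList.getD i ' '
    ('0' ≤ c && c ≤ '9') ||
      ((c == '+' || c == '-' || c == ' ' || c == '\t' || c == '\n' || c == '\r')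
        && xkcd.toList.getD (i + 1) '!' == '0'))) = true
instance (xkcd : String) : Decidable (Pre_speed_decode_value xkcd) := by
  unfold Pre_speed_decode_value; infer_instance
def pvWitness_speed_decode_value : String := "90"
def Spec_speed_decode_value (xkcd : String) (out : Int) : Prop := out = speed_decode_value_alt xkcd
instance (xkcd : String) (out : Int) : Decidable (Spec_speed_decode_value xkcd out) := by unfold Spec_speed_decode_value; infer_instance

-- ===== CLAIM (what is proved, stated in full; the proofs are below) =====
def Claim_equal_speed_decode_value : Prop := ∀ (xkcd : String), Dom_speed_decode_value xkcd → Pre_speed_decode_value xkcd → Spec_speed_decode_value xkcd (speed_decode_value xkcd)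

-- ===== LEMMAS AND PROOFS =====

-- the integer value of one closed token
def pvTV (cs : List Char) : Int := (PySem.Int.ofChars? cs).getD 0

-- forward token values: skip leading zeros, each non-zero character
-- takes the run of zeros after it
def pvTokvals : List Char → List Int
  | [] => []
  | c :: rest =>
    if c = '0' then pvTokvals rest
    else pvTV (c :: rest.takeWhile (· = '0')) :: pvTokvals (rest.dropWhile (· = '0'))
termination_by l => l.length
decreasing_by
  · simp
  · simpa [Nat.lt_succ_iff] using List.length_dropWhile_le (· = '0') rest

-- signed sum: a value is subtracted when its successor is larger
def pvSumTok : List Int → Int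
  | [] => 0
  | v :: vs => (if vs.headD 0 > v then -v else v) + pvSumTok vs

theorem pvTokvals_dropWhile (l : List Char) :
    pvTokvals (l.dropWhile (· = '0')) = pvTokvals l := by
  induction l with
  | nil => rfl
  | cons c rest ih =>
    by_cases h : c = '0'
    · simp [List.dropWhile, h, pvTokvals, ih]
    · simp [List.dropWhile, h]

-- A's reversed loop, read as a foldr, computes (leading zeros, first token, signed sum)
theorem pvA_inv (l : List Char) :
    l.foldr
      (fun digit (st : List Char × Int × Int) =>
        let w := digit :: st.1
        if digit ≠ '0' then
          let wv := (PySem.Int.ofChars? w).getD 0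
          ([], wv, if st.2.1 > wv then st.2.2 - wv else st.2.2 + wv)
        else (w, st.2.1, st.2.2))
      ([], 0, 0)
    = (l.takeWhile (· = '0'), (pvTokvals l).headD 0, pvSumTok (pvTokvals l)) := by
  induction l with
  | nil => simp [pvTokvals, pvSumTok]
  | cons c rest ih =>
    by_cases h : c = '0'
    · subst h
      rw [List.foldr_cons, ih]
      simp [pvTokvals, List.takeWhile]
    · rw [List.foldr_cons, ih, pvTokvals, pvTokvals_dropWhile]
      simp [List.takeWhile, h, pvTV, pvSumTok]
      split <;> ring

-- closing B's first-pass state into the final value list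
def pvFinish (st : Option (List Char) × List Int) : List Int :=
  match st.1 with
  | none => st.2
  | some t => st.2 ++ [pvTV t]

-- B's first-pass fold function (as in the port)
def pvGB (st : Option (List Char) × List Int) (ch : Char) : Option (List Char) × List Int :=
  if ch = '0' then
    match st.1 with
    | none => st
    | some t => (some (t ++ ['0']), st.2)
  else
    match st.1 with
    | none => (some [ch], st.2)
    | some t => (some [ch], st.2 ++ [pvTV t])

theorem pvB_inv_some (l : List Char) :
    ∀ (t : List Char) (acc : List Int),
      pvFinish (l.foldl pvGB (some t, acc))
        = acc ++ pvTV (t ++ l.takeWhile (· = '0')) :: pvTokvals (l.dropWhile (· = '0')) := by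
  induction l with
  | nil => intro t acc; simp [pvFinish, pvTokvals]
  | cons c rest ih =>
    intro t acc
    by_cases h : c = '0'
    · simp only [List.foldl, pvGB, h, if_pos]
      rw [ih]
      simp [List.takeWhile, List.dropWhile]
    · simp only [List.foldl, pvGB, h, if_neg, not_false_iff]
      rw [ih]
      simp [List.takeWhile, List.dropWhile, h, pvTokvals]

theorem pvB_inv_none (l : List Char) :
    ∀ (acc : List Int), pvFinish (l.foldl pvGB (none, acc)) = acc ++ pvTokvals l := by
  induction l with
  | nil => intro acc; simp [pvFinish, pvTokvals]
  | cons c rest ih =>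
    intro acc
    by_cases h : c = '0'
    · simp only [List.foldl, pvGB, h, if_pos]
      rw [ih, pvTokvals]
      simp [h]
    · simp only [List.foldl, pvGB, h, if_neg, not_false_iff]
      rw [pvB_inv_some]
      rw [pvTokvals]
      simp [h, pvTV]

-- B's second pass over zip(vals, vals[1:] + [0]) is the signed sum
theorem pvB_pass2 (vals : List Int) :
    ∀ (a : Int),
      (vals.zip (vals.drop 1 ++ [0])).foldl
        (fun total p => total + (if p.2 > p.1 then -p.1 else p.1)) a
      = a + pvSumTok vals := by
  induction vals with
  | nil => intro a; simp [pvSumTok]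
  | cons v vs ih =>
    intro a
    simp only [List.drop_succ_cons, List.drop_zero] at ih ⊢
    cases vs with
    | nil => simp [pvSumTok]
    | cons w ws =>
      simp only [List.drop_succ_cons, List.drop_zero] at ih
      simp only [List.cons_append, List.zip_cons_cons, List.foldl_cons]
      rw [ih]
      simp [pvSumTok]
      ring

-- ===== VERDICT (by name: the statement is the Claim_ definition above) =====
theorem speed_decode_value_spec : Claim_equal_speed_decode_value := by
  intro xkcd _ _
  unfold Spec_speed_decode_value speed_decode_value speed_decode_value_alt
  rw [List.foldl_reverse, pvA_inv]
  have h1 : (fun (st : Option (List Char) × List Int) ch =>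
      if ch = '0' then
        match st.1 with
        | none => st
        | some t => (some (t ++ ['0']), st.2)
      else
        match st.1 with
        | none => (some [ch], st.2)
        | some t => (some [ch], st.2 ++ [(PySem.Int.ofChars? t).getD 0])) = pvGB := rfl
  have h2 := pvB_inv_none xkcd.toList []
  simp only [List.nil_append] at h2
  show pvSumTok (pvTokvals xkcd.toList) = _
  simp only [h1]
  rw [show (match (List.foldl pvGB (none, []) xkcd.toList).1 with
      | none => (List.foldl pvGB (none, []) xkcd.toList).2
      | some t => (List.foldl pvGB (none, []) xkcd.toList).2 ++ [(PySem.Int.ofChars? t).getD 0])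
      = pvFinish (List.foldl pvGB (none, []) xkcd.toList) from rfl, h2, pvB_pass2]
  ring
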